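-- pv_equiv track=rewrite | github.com/RicoPsych/KeywordExtractionService-Project | tests/semeval_test.py | bio_tags_to_keywords
-- ===== SOURCE A (Python) =====
-- def bio_tags_to_keywords(document, bio_tags):
--     """Convert BIO tags to keywords."""
--     keywords = []
--     current_keyword = []
--
--     for token, tag in zip(document, bio_tags):
--         if tag.startswith("B"):
--             if current_keyword:
--                 keywords.append(" ".join(current_keyword))
--                 current_keyword = []
--             current_keyword.append(token)
--         elif tag.startswith("I") and current_keyword:
--             current_keyword.append(token)
--         elif current_keyword:
--             keywords.append(" ".join(current_keyword))
--             current_keyword = []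
--
--     if current_keyword:
--         keywords.append(" ".join(current_keyword))
--
--     return keywords
-- ===== SOURCE B (Python) =====
-- def bio_tags_to_keywords(document, bio_tags):
--     """Convert BIO tags to keywords (span-scan re-implementation)."""
--     pairs = list(zip(document, bio_tags))
--     n = len(pairs)
--     keywords = []
--     i = 0
--     while i < n:
--         token, tag = pairs[i]
--         if tag.startswith("B"):
--             span = [token]
--             j = i + 1
--             while j < n and pairs[j][1].startswith("I"):
--                 span.append(pairs[j][0])
--                 j += 1
--             keywords.append(" ".join(span))
--             i = j
--         else:
--             i += 1
--     return keywords
-- ===== Notes on version B (the rewrite author's own statement) =====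
-- stated objective: alternative
-- what changed: Replaces A's persistent current_keyword accumulator with flush-on-state-change by an index scan that, at each 'B' tag, extends a span through the following 'I' tags with an inner loop and jumps past it; tokens under 'O' or orphan 'I' tags are simply skipped, no flush bookkeeping.
import Mathlib
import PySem

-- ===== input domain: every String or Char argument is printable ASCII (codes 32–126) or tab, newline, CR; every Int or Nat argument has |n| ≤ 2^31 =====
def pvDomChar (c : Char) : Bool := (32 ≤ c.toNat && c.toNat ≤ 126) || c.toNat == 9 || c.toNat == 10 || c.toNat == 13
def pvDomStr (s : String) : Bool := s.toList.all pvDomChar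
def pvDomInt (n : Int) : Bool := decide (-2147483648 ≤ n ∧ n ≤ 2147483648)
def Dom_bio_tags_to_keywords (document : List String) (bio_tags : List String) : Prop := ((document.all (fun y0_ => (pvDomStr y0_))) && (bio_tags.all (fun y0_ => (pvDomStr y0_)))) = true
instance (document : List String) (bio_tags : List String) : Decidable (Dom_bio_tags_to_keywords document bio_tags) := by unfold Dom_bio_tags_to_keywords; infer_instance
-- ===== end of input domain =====

-- B replaces A's persistent current-keyword accumulator with an index-free span scan:
-- at each 'B' tag it extends a span through the following 'I' tags and emits it at once (objective: alternative).


-- ===== PORT A =====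
-- one loop step of A: state = (keywords, current_keyword)
def aStep (st : List String × List String) (p : String × String) : List String × List String :=
  if PySem.Str.startswith p.2 "B" then
    if st.2 ≠ [] then (st.1 ++ [PySem.Str.join " " st.2], [] ++ [p.1])
    else (st.1, st.2 ++ [p.1])
  else if PySem.Str.startswith p.2 "I" ∧ st.2 ≠ [] then
    (st.1, st.2 ++ [p.1])
  else if st.2 ≠ [] then
    (st.1 ++ [PySem.Str.join " " st.2], [])
  else st

-- the final 'if current_keyword: keywords.append(...)'
def aFinish (st : List String × List String) : List String :=
  if st.2 ≠ [] then st.1 ++ [PySem.Str.join " " st.2] else st.1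

def bio_tags_to_keywords (document : List String) (bio_tags : List String) : List String :=
  aFinish ((document.zip bio_tags).foldl aStep ([], []))

-- ===== PORT B =====
-- inner while loop: collect tokens while the tag starts with "I", return (span tokens, remaining pairs)
def bSpan : List (String × String) → List String × List (String × String)
  | [] => ([], [])
  | (tok, tag) :: rest =>
      if PySem.Str.startswith tag "I" then
        let r := bSpan rest
        (tok :: r.1, r.2)
      else ([], (tok, tag) :: rest)

theorem bSpan_len_le : ∀ ps : List (String × String), (bSpan ps).2.length ≤ ps.length := by
  intro ps
  induction ps with
  | nil => simp [bSpan]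
  | cons p rest ih =>
      obtain ⟨tok, tag⟩ := p
      simp only [bSpan]
      split
      · exact Nat.le_succ_of_le ih
      · simp

-- outer while loop over the zipped pairs
def bGo : List (String × String) → List String
  | [] => []
  | (tok, tag) :: rest =>
      if PySem.Str.startswith tag "B" then
        PySem.Str.join " " (tok :: (bSpan rest).1) :: bGo (bSpan rest).2
      else bGo rest
  termination_by ps => ps.length
  decreasing_by
    · exact Nat.lt_succ_of_le (bSpan_len_le rest)
    · simp

def bio_tags_to_keywords_alt (document : List String) (bio_tags : List String) : List String :=
  bGo (document.zip bio_tags)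

-- ===== PRECONDITION & SPEC =====
def Spec_bio_tags_to_keywords (document : List String) (bio_tags : List String) (out : List String) : Prop := out = bio_tags_to_keywords_alt document bio_tags
instance (document : List String) (bio_tags : List String) (out : List String) : Decidable (Spec_bio_tags_to_keywords document bio_tags out) := by unfold Spec_bio_tags_to_keywords; infer_instance

-- ===== CLAIM (what is proved, stated in full; the proofs are below) =====
def Claim_equal_bio_tags_to_keywords : Prop := ∀ (document : List String) (bio_tags : List String), Dom_bio_tags_to_keywords document bio_tags → Spec_bio_tags_to_keywords document bio_tags (bio_tags_to_keywords document bio_tags)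

-- ===== LEMMAS AND PROOFS =====
-- a tag cannot start with both "B" and "I"
theorem startswith_B_not_I (s : String) (h : PySem.Str.startswith s "B" = true) :
    PySem.Str.startswith s "I" = false := by
  by_contra hI
  rw [Bool.not_eq_false] at hI
  rw [PySem.Str.startswith_eq] at h hI
  rw [PySem.Chars.startswith_iff] at h hI
  rcases h with ⟨t1, h1⟩
  rcases hI with ⟨t2, h2⟩
  have : "B".toList ++ t1 = "I".toList ++ t2 := h1.trans h2.symm
  simp at this

-- the joint loop invariant: running A's loop (followed by the final flush) from state (kw, cur)
-- produces B's spans; with nonempty cur, A first finishes the open span through bSpan.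
theorem loop_invariant : ∀ ps : List (String × String),
    (∀ kw cur, cur ≠ [] →
      aFinish (ps.foldl aStep (kw, cur)) =
        kw ++ PySem.Str.join " " (cur ++ (bSpan ps).1) :: bGo (bSpan ps).2) ∧
    (∀ kw, aFinish (ps.foldl aStep (kw, [])) = kw ++ bGo ps) := by
  intro ps
  induction ps with
  | nil =>
      constructor
      · intro kw cur hc
        simp [aFinish, bSpan, bGo, hc]
      · intro kw
        simp [aFinish, bGo]
  | cons p rest ih =>
      obtain ⟨tok, tag⟩ := p
      constructor
      · intro kw cur hc
        by_cases hB : PySem.Str.startswith tag "B" = true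
        · have hI := startswith_B_not_I tag hB
          have hIc : PySem.Chars.startswith tag.toList ['I'] = false := by simpa using hI
          have hBc : PySem.Chars.startswith tag.toList ['B'] = true := by simpa using hB
          simp only [List.foldl_cons, aStep, hB, hI, hc, if_pos, ne_eq,
            not_false_iff, List.nil_append]
          rw [(ih.1 (kw ++ [PySem.Str.join " " cur]) [tok] (by simp))]
          simp [bSpan, bGo, hIc, hBc]
        · by_cases hI : PySem.Str.startswith tag "I" = true
          · have hIc : PySem.Chars.startswith tag.toList ['I'] = true := by simpa using hI
            simp only [List.foldl_cons, aStep, hB, hI, hc, ne_eq, not_false_iff,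
              and_true, if_true, if_false, Bool.false_eq_true]
            rw [ih.1 kw (cur ++ [tok]) (by simp)]
            simp [bSpan, hIc]
          · have hIc : PySem.Chars.startswith tag.toList ['I'] = false := by simpa using hI
            have hBc : PySem.Chars.startswith tag.toList ['B'] = false := by simpa using hB
            simp only [List.foldl_cons, aStep, hB, hI, hc, ne_eq, not_false_iff,
              false_and, if_true, if_false, Bool.false_eq_true]
            rw [ih.2 (kw ++ [PySem.Str.join " " cur])]
            simp [bSpan, bGo, hIc, hBc]
      · intro kw
        by_cases hB : PySem.Str.startswith tag "B" = true
        · have hBc : PySem.Chars.startswith tag.toList ['B'] = true := by simpa using hB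
          simp only [List.foldl_cons, aStep, hB, if_true, ne_eq, not_true_eq_false,
            if_false, List.nil_append]
          rw [ih.1 kw [tok] (by simp)]
          simp [bGo, hBc]
        · have hBc : PySem.Chars.startswith tag.toList ['B'] = false := by simpa using hB
          simp only [List.foldl_cons, aStep, hB, ne_eq, not_true_eq_false, and_false,
            if_false, Bool.false_eq_true]
          rw [ih.2 kw]
          simp [bGo, hBc]

-- ===== VERDICT (by name: the statement is the Claim_ definition above) =====
theorem bio_tags_to_keywords_spec : Claim_equal_bio_tags_to_keywords := by
  intro document bio_tags _
  unfold Spec_bio_tags_to_keywords bio_tags_to_keywords bio_tags_to_keywords_alt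
  rw [(loop_invariant (document.zip bio_tags)).2 []]
  simp
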